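-- pv_equiv track=rewrite | github.com/hassonlab/podcast-benchmark | scripts/set_foundation_model_global_keys.py | lag_range_from_points
-- ===== SOURCE A (Python) =====
-- def lag_range_from_points(lags: list[int]) -> tuple[int, int, int]:
--     if len(lags) < 2:
--         raise ValueError("Need at least two lag points to derive step size.")
--
--     steps = [b - a for a, b in zip(lags, lags[1:])]
--     if len(set(steps)) != 1:
--         raise ValueError(f"Lags are not evenly spaced: {lags}")
--
--     step = steps[0]
--     return lags[0], lags[-1] + step, step
-- ===== SOURCE B (Python) =====
-- def lag_range_from_points(lags: list[int]) -> tuple[int, int, int]: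
--     if len(lags) < 2:
--         raise ValueError("Need at least two lag points to derive step size.")
--
--     step = lags[1] - lags[0]
--     if not all(lags[i] == lags[0] + i * step for i in range(len(lags))):
--         raise ValueError(f"Lags are not evenly spaced: {lags}")
--
--     return lags[0], lags[-1] + step, step
-- ===== Notes on version B (the rewrite author's own statement) =====
-- stated objective: alternative
-- what changed: Instead of materialising the list of consecutive differences and deduplicating it with set(), B derives step from the first pair and validates each element against its closed-form arithmetic position lags[0] + i*step in one short-circuiting pass.
import Mathlib
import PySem

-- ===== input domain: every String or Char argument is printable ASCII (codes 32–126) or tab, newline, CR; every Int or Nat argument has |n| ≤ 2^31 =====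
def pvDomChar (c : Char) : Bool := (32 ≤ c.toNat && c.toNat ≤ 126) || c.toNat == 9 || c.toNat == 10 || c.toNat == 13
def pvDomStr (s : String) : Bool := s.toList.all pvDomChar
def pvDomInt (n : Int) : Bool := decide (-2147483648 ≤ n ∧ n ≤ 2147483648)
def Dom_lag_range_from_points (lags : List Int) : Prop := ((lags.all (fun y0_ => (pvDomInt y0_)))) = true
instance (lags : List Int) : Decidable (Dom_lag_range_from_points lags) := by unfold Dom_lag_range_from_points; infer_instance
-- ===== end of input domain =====

-- B validates the lags against their closed-form arithmetic positions instead of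
-- deduplicating the list of consecutive differences (objective: alternative).
-- Both Pythons raise ValueError outside Pre_; the ports return (0, 0, 0) there.

-- ===== PORT A =====
def lag_range_from_points (lags : List Int) : Int × Int × Int :=
  if lags.length < 2 then (0, 0, 0)   -- raise ValueError
  else
    let steps := (lags.zip lags.tail).map (fun p => p.2 - p.1)
    if (PySem.Set.ofList steps).length ≠ 1 then (0, 0, 0)   -- raise ValueError
    else
      let step := steps.headD 0       -- steps[0]; steps ≠ [] since len(lags) ≥ 2
      (lags.headD 0, lags.getLastD 0 + step, step)   -- lags[0], lags[-1] + step

-- ===== PORT B =====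
def lag_range_from_points_alt (lags : List Int) : Int × Int × Int :=
  if lags.length < 2 then (0, 0, 0)   -- raise ValueError
  else
    let step := lags.getD 1 0 - lags.getD 0 0   -- lags[1] - lags[0]; both in range
    if ¬ (List.range lags.length).all
        (fun i => lags.getD i 0 == lags.getD 0 0 + (i : Int) * step) then
      (0, 0, 0)   -- raise ValueError
    else
      (lags.getD 0 0, lags.getLastD 0 + step, step)   -- lags[0], lags[-1] + step

-- ===== PRECONDITION & SPEC =====
-- Pre_: at least two lags, evenly spaced — exactly where the Python A returns (no raise).
def Pre_lag_range_from_points (lags : List Int) : Prop :=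
  2 ≤ lags.length ∧
  ∀ i < lags.length,
    lags.getD i 0 = lags.getD 0 0 + (i : Int) * (lags.getD 1 0 - lags.getD 0 0)
instance (lags : List Int) : Decidable (Pre_lag_range_from_points lags) := by
  unfold Pre_lag_range_from_points; infer_instance

def pvWitness_lag_range_from_points : List Int := [-6, -3, 0, 3, 6]

def Spec_lag_range_from_points (lags : List Int) (out : Int × Int × Int) : Prop :=
  out = lag_range_from_points_alt lags
instance (lags : List Int) (out : Int × Int × Int) :
    Decidable (Spec_lag_range_from_points lags out) := by
  unfold Spec_lag_range_from_points; infer_instance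

-- ===== CLAIM (what is proved, stated in full; the proofs are below) =====
def Claim_equal_lag_range_from_points : Prop :=
  ∀ (lags : List Int), Dom_lag_range_from_points lags →
    Pre_lag_range_from_points lags →
    Spec_lag_range_from_points lags (lag_range_from_points lags)

-- ===== LEMMAS AND PROOFS =====

-- folding Set.add over a list all of whose elements are s, starting from [s], stays [s]
theorem pv_foldl_add_const {l : List Int} {s : Int} (h : ∀ x ∈ l, x = s) :
    l.foldl PySem.Set.add [s] = [s] := by
  induction l with
  | nil => rfl
  | cons x xs ih =>
      have hx : x = s := h x (List.mem_cons_self)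
      subst hx
      simp only [List.foldl_cons]
      have hadd : PySem.Set.add [x] x = [x] := by
        simp [PySem.Set.add, PySem.Set.contains]
      rw [hadd]
      exact ih (fun y hy => h y (List.mem_cons_of_mem _ hy))

theorem pv_ofList_const {l : List Int} {s : Int} (hne : l ≠ [])
    (h : ∀ x ∈ l, x = s) : PySem.Set.ofList l = [s] := by
  cases l with
  | nil => exact absurd rfl hne
  | cons x xs =>
      have hx : x = s := h x (List.mem_cons_self)
      subst hx
      rw [PySem.Set.ofList_eq_foldl]
      simp only [List.foldl_cons]
      have : PySem.Set.add [] x = [x] := by simp [PySem.Set.add, PySem.Set.contains]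
      rw [this]
      exact pv_foldl_add_const (fun y hy => h y (List.mem_cons_of_mem _ hy))

-- each consecutive difference equals lags[1] - lags[0] under Pre_
theorem pv_steps_const (lags : List Int)
    (hn : 2 ≤ lags.length)
    (hap : ∀ i < lags.length,
      lags.getD i 0 = lags.getD 0 0 + (i : Int) * (lags.getD 1 0 - lags.getD 0 0)) :
    ∀ x ∈ (lags.zip lags.tail).map (fun p => p.2 - p.1),
      x = lags.getD 1 0 - lags.getD 0 0 := by
  intro x hx
  obtain ⟨⟨a, b⟩, hmem, hxe⟩ := List.mem_map.mp hx
  obtain ⟨j, hj, hje⟩ := List.mem_iff_getElem.mp hmem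
  have hj' : j < min lags.length lags.tail.length := by
    simpa [List.length_zip] using hj
  have hjl : j < lags.length := lt_of_lt_of_le hj' (min_le_left _ _)
  have hjt : j < lags.tail.length := lt_of_lt_of_le hj' (min_le_right _ _)
  have hj1 : j + 1 < lags.length := by
    have := hjt; rw [List.length_tail] at this; omega
  have hzip : (lags.zip lags.tail)[j] = (lags[j], lags.tail[j]) := by
    simp [List.getElem_zip]
  have htail : lags.tail[j] = lags[j + 1] := by
    simp [List.getElem_tail]
  have ha : a = lags[j] := by
    have := hje ▸ hzip; exact (Prod.mk.injEq _ _ _ _ ▸ this.symm).1.symm ▸ rfl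
  have hb : b = lags.tail[j] := by
    have := hje ▸ hzip; exact (Prod.mk.injEq _ _ _ _ ▸ this.symm).2.symm ▸ rfl
  have hga : lags[j] = lags.getD j 0 := (List.getD_eq_getElem _ _ hjl).symm
  have hgb : lags[j + 1] = lags.getD (j + 1) 0 := (List.getD_eq_getElem _ _ hj1).symm
  have e1 := hap j hjl
  have e2 := hap (j + 1) hj1
  subst hxe
  rw [ha, hb, htail, hga, hgb, e1, e2]
  push_cast
  ring

theorem lag_range_from_points_eq (lags : List Int)
    (hpre : Pre_lag_range_from_points lags) :
    lag_range_from_points lags = lag_range_from_points_alt lags := by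
  obtain ⟨hn, hap⟩ := hpre
  have hnl : ¬ lags.length < 2 := by omega
  set s := lags.getD 1 0 - lags.getD 0 0 with hs
  -- B's check passes
  have hall : (List.range lags.length).all
      (fun i => lags.getD i 0 == lags.getD 0 0 + (i : Int) * s) = true := by
    rw [List.all_eq_true]
    intro i hi
    rw [List.mem_range] at hi
    simpa using hap i hi
  -- A's steps list is nonempty and constantly s
  have hstne : (lags.zip lags.tail).map (fun p => p.2 - p.1) ≠ [] := by
    have hlen : ((lags.zip lags.tail).map (fun p => p.2 - p.1)).length
        = min lags.length lags.tail.length := by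
      simp [List.length_zip]
    intro hc
    rw [hc] at hlen
    rw [List.length_tail] at hlen
    simp at hlen
    omega
  have hconst := pv_steps_const lags hn hap
  have hset : PySem.Set.ofList ((lags.zip lags.tail).map (fun p => p.2 - p.1)) = [s] :=
    pv_ofList_const hstne hconst
  -- A's step (steps[0]) equals s
  have hhead : ((lags.zip lags.tail).map (fun p => p.2 - p.1)).headD 0 = s := by
    cases hst : (lags.zip lags.tail).map (fun p => p.2 - p.1) with
    | nil => exact absurd hst hstne
    | cons x xs =>
        have : x = s := hconst x (hst ▸ List.mem_cons_self)
        simp [this]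
  -- lags[0] = lags.getD 0 0 via headD
  have hhd : lags.headD 0 = lags.getD 0 0 := by
    cases lags with
    | nil => rfl
    | cons a l => rfl
  simp only [lag_range_from_points, lag_range_from_points_alt]
  rw [if_neg hnl, if_neg hnl, hset, hhead, hhd]
  rw [if_neg (by simp), if_neg (fun hc => hc hall)]

-- ===== VERDICT (by name: the statement is the Claim_ definition above) =====
theorem lag_range_from_points_spec : Claim_equal_lag_range_from_points := by
  intro lags _ hpre
  unfold Spec_lag_range_from_points
  exact lag_range_from_points_eq lags hpre
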